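-- pv_equiv track=rewrite | github.com/piggyatbaqaqi/skol | pdf_section_extractor.py | _get_section_name
-- ===== SOURCE A (Python) =====
-- from typing import List, Optional, Dict, Any
--
-- def _get_section_name(header_text: str) -> Optional[str]:
--     """
--     Extract standardized section name from header text.
--
--     Args:
--         header_text: Header text to analyze
--
--     Returns:
--         Standardized section name, or None if not a known section
--     """
--     text_lower = header_text.strip().lower()
--
--     # Map of section keywords to standardized names
--     section_map = {
--         'introduction': 'Introduction',
--         'abstract': 'Abstract',
--         'key words': 'Keywords',
--         'keywords': 'Keywords',
--         'taxonomy': 'Taxonomy',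
--         'materials and methods': 'Materials and Methods',
--         'methods': 'Methods',
--         'results': 'Results',
--         'discussion': 'Discussion',
--         'acknowledgments': 'Acknowledgments',
--         'acknowledgements': 'Acknowledgments',
--         'references': 'References',
--         'conclusion': 'Conclusion',
--         'description': 'Description',
--         'etymology': 'Etymology',
--         'specimen': 'Specimen',
--         'holotype': 'Holotype',
--         'paratype': 'Paratype',
--         'literature cited': 'Literature Cited',
--         'background': 'Background',
--         'objectives': 'Objectives',
--         'summary': 'Summary',
--         'figures': 'Figures',
--         'tables': 'Tables',
--         'appendix': 'Appendix',
--         'supplementary': 'Supplementary'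
--     }
--
--     # Check for exact matches or starts with
--     for keyword, standard_name in section_map.items():
--         if text_lower == keyword or text_lower.startswith(keyword):
--             return standard_name
--
--     return None
-- ===== SOURCE B (Python) =====
-- from typing import Optional
--
-- # Compact spec: one "keyword:StandardName" entry per string; parsed once at
-- # import into a lookup table.
-- _SPEC_ENTRIES = (
--     "introduction:Introduction", "abstract:Abstract", "key words:Keywords",
--     "keywords:Keywords", "taxonomy:Taxonomy",
--     "materials and methods:Materials and Methods", "methods:Methods",
--     "results:Results", "discussion:Discussion",
--     "acknowledgments:Acknowledgments", "acknowledgements:Acknowledgments",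
--     "references:References", "conclusion:Conclusion",
--     "description:Description", "etymology:Etymology", "specimen:Specimen",
--     "holotype:Holotype", "paratype:Paratype",
--     "literature cited:Literature Cited", "background:Background",
--     "objectives:Objectives", "summary:Summary", "figures:Figures",
--     "tables:Tables", "appendix:Appendix", "supplementary:Supplementary",
-- )
--
-- _TABLE = {}
-- for _entry in _SPEC_ENTRIES:
--     _k, _v = _entry.split(':')
--     _TABLE[_k] = _v
--
-- _MAX_KEY_LEN = max(len(k) for k in _TABLE)  # = 21
--
--
-- def _get_section_name(header_text: str) -> Optional[str]:
--     """Extract standardized section name from header text.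
--
--     Instead of scanning every keyword with startswith, look the prefixes of
--     the (stripped, lowered) text up in the keyword table directly: since no
--     keyword is a prefix of another, the first prefix that is a key gives the
--     unique match.
--     """
--     text_lower = header_text.strip().lower()
--     for i in range(1, min(len(text_lower), _MAX_KEY_LEN) + 1):
--         name = _TABLE.get(text_lower[:i])
--         if name is not None:
--             return name
--     return None
-- ===== Notes on version B (the rewrite author's own statement) =====
-- stated objective: alternative
-- what changed: Replaces the per-keyword startswith scan over all 26 map entries by a single pass over the prefixes of the stripped lowered text (at most 21 of them), each looked up directly in a keyword table built once by parsing a compact spec string; no keyword is a prefix of another, so the unique match is found.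
import Mathlib
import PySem

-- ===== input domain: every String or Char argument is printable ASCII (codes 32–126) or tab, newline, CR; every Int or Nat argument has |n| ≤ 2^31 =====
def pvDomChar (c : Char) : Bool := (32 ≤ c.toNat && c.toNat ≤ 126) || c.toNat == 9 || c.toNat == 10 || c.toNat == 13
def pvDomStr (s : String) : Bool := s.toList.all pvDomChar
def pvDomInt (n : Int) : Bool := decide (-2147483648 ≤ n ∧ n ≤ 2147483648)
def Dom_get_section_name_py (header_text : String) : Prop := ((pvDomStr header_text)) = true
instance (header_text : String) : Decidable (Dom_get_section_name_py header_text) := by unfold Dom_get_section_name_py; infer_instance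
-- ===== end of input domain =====

-- B replaces A's per-keyword startswith scan by looking the prefixes of the stripped
-- lowered text up in a keyword table (built once from a compact spec string); same result.

-- ===== PORT A =====
-- the section_map dict literal of A (distinct keys, insertion order)
def sectionPairs : List (String × String) :=
  [("introduction", "Introduction"),
   ("abstract", "Abstract"),
   ("key words", "Keywords"),
   ("keywords", "Keywords"),
   ("taxonomy", "Taxonomy"),
   ("materials and methods", "Materials and Methods"),
   ("methods", "Methods"),
   ("results", "Results"),
   ("discussion", "Discussion"),
   ("acknowledgments", "Acknowledgments"),
   ("acknowledgements", "Acknowledgments"),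
   ("references", "References"),
   ("conclusion", "Conclusion"),
   ("description", "Description"),
   ("etymology", "Etymology"),
   ("specimen", "Specimen"),
   ("holotype", "Holotype"),
   ("paratype", "Paratype"),
   ("literature cited", "Literature Cited"),
   ("background", "Background"),
   ("objectives", "Objectives"),
   ("summary", "Summary"),
   ("figures", "Figures"),
   ("tables", "Tables"),
   ("appendix", "Appendix"),
   ("supplementary", "Supplementary")]

-- 'for keyword, standard_name in section_map.items(): if text_lower == keyword or text_lower.startswith(keyword): return standard_name'
def loopA (t : String) : List (String × String) → Option String
  | [] => none
  | kv :: rest =>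
    if t == kv.1 || PySem.Str.startswith t kv.1 then some kv.2 else loopA t rest

def get_section_name_py (header_text : String) : Option String :=
  let text_lower := PySem.Str.lower (PySem.Str.strip header_text)
  loopA text_lower sectionPairs

-- ===== PORT B =====
-- the compact spec _SPEC_ENTRIES of Source B
def specEntries : List String :=
  ["introduction:Introduction", "abstract:Abstract", "key words:Keywords",
   "keywords:Keywords", "taxonomy:Taxonomy",
   "materials and methods:Materials and Methods", "methods:Methods",
   "results:Results", "discussion:Discussion",
   "acknowledgments:Acknowledgments", "acknowledgements:Acknowledgments",
   "references:References", "conclusion:Conclusion",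
   "description:Description", "etymology:Etymology", "specimen:Specimen",
   "holotype:Holotype", "paratype:Paratype",
   "literature cited:Literature Cited", "background:Background",
   "objectives:Objectives", "summary:Summary", "figures:Figures",
   "tables:Tables", "appendix:Appendix", "supplementary:Supplementary"]

-- "for _entry in _SPEC_ENTRIES: _k, _v = _entry.split(':'); _TABLE[_k] = _v"
-- (every entry splits into exactly two pieces; the other branches are the unreachable
--  ValueError case of the unpacking, on which the loop body would raise)
def sectionTable : PySem.Dict String String :=
  specEntries.foldl
    (fun d entry =>
      match PySem.Str.split? entry ":" with
      | some [k, v] => PySem.Dict.insert d k v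
      | _ => d)
    PySem.Dict.empty

-- module constant _MAX_KEY_LEN = max(len(k) for k in _TABLE), evaluated once at import = 21
def maxKeyLen : Int := 21

-- 'for i in range(1, min(len(text_lower), _MAX_KEY_LEN) + 1): name = _TABLE.get(text_lower[:i]); if name is not None: return name'
def loopB (t : String) : List Int → Option String
  | [] => none
  | i :: rest =>
    match PySem.Dict.get? sectionTable (PySem.Str.slice t none (some i)) with
    | some name => some name
    | none => loopB t rest

def get_section_name_py_alt (header_text : String) : Option String :=
  let text_lower := PySem.Str.lower (PySem.Str.strip header_text)
  loopB text_lower (PySem.List.pyRange 1 (min ((PySem.Str.len text_lower : Int)) maxKeyLen + 1) 1)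

-- ===== PRECONDITION & SPEC =====
def Spec_get_section_name_py (header_text : String) (out : Option String) : Prop := out = get_section_name_py_alt header_text
instance (header_text : String) (out : Option String) : Decidable (Spec_get_section_name_py header_text out) := by unfold Spec_get_section_name_py; infer_instance

-- ===== CLAIM (what is proved, stated in full; the proofs are below) =====
def Claim_equal_get_section_name_py : Prop := ∀ (header_text : String), Dom_get_section_name_py header_text → Spec_get_section_name_py header_text (get_section_name_py header_text)

-- ===== LEMMAS AND PROOFS =====

-- B's lookup at one prefix length, named for the proofs
def hitB (t : String) (i : Int) : Option String :=
  PySem.Dict.get? sectionTable (PySem.Str.slice t none (some i))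

set_option maxRecDepth 1000000 in
theorem loopB_cons (t : String) (i : Int) (rest : List Int) :
    loopB t (i :: rest) = match hitB t i with
      | some name => some name
      | none => loopB t rest := rfl

-- parsing the spec entries yields exactly A's pairs as a literal dict
set_option maxRecDepth 1000000 in
set_option maxHeartbeats 4000000 in
theorem sectionTable_eq : sectionTable = PySem.Dict.mk sectionPairs := by decide

-- finite facts about the keyword table, checked by computation
theorem kw_lookup : ∀ kv ∈ sectionPairs, PySem.Dict.get? sectionTable kv.1 = some kv.2 := by
  rw [sectionTable_eq]; decide

theorem kw_len : ∀ kv ∈ sectionPairs, 1 ≤ kv.1.toList.length ∧ kv.1.toList.length ≤ 21 := by decide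

-- no keyword is a prefix of another (and equal keys carry equal values: keys are distinct)
theorem kw_prefix_free : ∀ kv1 ∈ sectionPairs, ∀ kv2 ∈ sectionPairs,
    kv1.1.toList <+: kv2.1.toList → kv1 = kv2 := by decide

-- hence at most one table entry has its key a prefix of a given text
theorem kw_uniq {kv1 kv2 : String × String} (h1 : kv1 ∈ sectionPairs) (h2 : kv2 ∈ sectionPairs)
    {t : List Char} (p1 : kv1.1.toList <+: t) (p2 : kv2.1.toList <+: t) : kv1 = kv2 := by
  rcases List.prefix_or_prefix_of_prefix p1 p2 with h | h
  · exact kw_prefix_free kv1 h1 kv2 h2 h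
  · exact (kw_prefix_free kv2 h2 kv1 h1 h).symm

theorem condA_iff (t : String) (kv : String × String) :
    (t == kv.1 || PySem.Str.startswith t kv.1) = true ↔ kv.1.toList <+: t.toList := by
  simp only [Bool.or_eq_true, beq_iff_eq, PySem.Str.startswith_eq, PySem.Chars.startswith_iff]
  constructor
  · rintro (rfl | h)
    · exact List.prefix_refl _
    · exact h
  · exact Or.inr

theorem loopA_eq_none (t : String) :
    ∀ l : List (String × String), (∀ kv ∈ l, ¬ kv.1.toList <+: t.toList) → loopA t l = none := by
  intro l
  induction l with
  | nil => intro _; rfl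
  | cons kv rest ih =>
    intro h
    have hc : (t == kv.1 || PySem.Str.startswith t kv.1) = false := by
      by_contra hb
      exact h kv (by simp) ((condA_iff t kv).mp (by revert hb; cases (t == kv.1 || PySem.Str.startswith t kv.1) <;> simp))
    simp only [loopA, hc, Bool.false_eq_true, if_false]
    exact ih (fun kv' h' => h kv' (List.mem_cons_of_mem _ h'))

theorem loopA_eq_some (t : String) (v : String) :
    ∀ l : List (String × String),
      (∃ kv ∈ l, kv.1.toList <+: t.toList ∧ kv.2 = v) →
      (∀ kv ∈ l, kv.1.toList <+: t.toList → kv.2 = v) → loopA t l = some v := by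
  intro l
  induction l with
  | nil => rintro ⟨kv, h, _⟩ _; exact absurd h (List.not_mem_nil)
  | cons kv0 rest ih =>
    rintro ⟨kv, hkv, hpre, hval⟩ huniq
    by_cases hc : (t == kv0.1 || PySem.Str.startswith t kv0.1) = true
    · simp only [loopA, hc, if_true]
      exact congrArg some (huniq kv0 (by simp) ((condA_iff t kv0).mp hc))
    · simp only [loopA, hc]
      rcases List.mem_cons.mp hkv with rfl | hmem
      · exact absurd ((condA_iff t kv).mpr hpre) hc
      · exact ih ⟨kv, hmem, hpre, hval⟩ (fun kv' h' => huniq kv' (List.mem_cons_of_mem _ h'))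

theorem loopB_eq_none (t : String) :
    ∀ is : List Int, (∀ i ∈ is, hitB t i = none) → loopB t is = none := by
  intro is
  induction is with
  | nil => intro _; rfl
  | cons i rest ih =>
    intro h
    rw [loopB_cons, h i (by simp)]
    exact ih (fun j hj => h j (List.mem_cons_of_mem _ hj))

theorem loopB_eq_some (t : String) (v : String) :
    ∀ is : List Int,
      (∃ i ∈ is, hitB t i = some v) →
      (∀ i ∈ is, ∀ w, hitB t i = some w → w = v) → loopB t is = some v := by
  intro is
  induction is with
  | nil => rintro ⟨i, h, _⟩ _; exact absurd h (List.not_mem_nil)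
  | cons i0 rest ih =>
    rintro ⟨i, hi, hhit⟩ huniq
    rw [loopB_cons]
    cases hh : hitB t i0 with
    | some w => exact congrArg some (huniq i0 (by simp) w hh)
    | none =>
      rcases List.mem_cons.mp hi with rfl | hmem
      · rw [hh] at hhit; exact absurd hhit (by simp)
      · exact ih ⟨i, hmem, hhit⟩ (fun j hj w hw => huniq j (List.mem_cons_of_mem _ hj) w hw)

-- first-match semantics of a literal dict: a successful lookup is one of the pairs
theorem get?_mk_mem {q v : String} :
    ∀ l : List (String × String), PySem.Dict.get? (PySem.Dict.mk l) q = some v → (q, v) ∈ l := by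
  intro l
  induction l with
  | nil => intro h; simp [PySem.Dict.get?] at h
  | cons kv rest ih =>
    intro h
    rw [PySem.Dict.get?_mk_cons] at h
    by_cases he : kv.1 == q
    · simp only [he, if_true, Option.some.injEq] at h
      have : kv = (q, v) := by
        rcases kv with ⟨k, w⟩
        simp_all [beq_iff_eq]
      simp [← this]
    · simp only [he] at h
      exact List.mem_cons_of_mem _ (ih h)

theorem hitB_some_mem {t : String} {i : Int} {v : String} (h : hitB t i = some v) :
    (PySem.Str.slice t none (some i), v) ∈ sectionPairs := by
  rw [hitB, sectionTable_eq] at h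
  exact get?_mk_mem sectionPairs h

-- the slice text_lower[:i] for 0 ≤ i is a prefix of the text
theorem slice_toList (t : String) (i : Int) (hi : 0 ≤ i) :
    (PySem.Str.slice t none (some i)).toList = t.toList.take i.toNat := by
  simp [PySem.List.slice_to _ hi]

-- ===== MAIN LEMMA: the two loops agree on every text =====
set_option maxHeartbeats 1000000 in
theorem loops_agree (t : String) :
    loopA t sectionPairs =
      loopB t (PySem.List.pyRange 1 (min ((PySem.Str.len t : Int)) maxKeyLen + 1) 1) := by
  by_cases hex : ∃ kv ∈ sectionPairs, kv.1.toList <+: t.toList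
  · rcases hex with ⟨kv, hkv, hpre⟩
    have huniqA : ∀ kv' ∈ sectionPairs, kv'.1.toList <+: t.toList → kv'.2 = kv.2 :=
      fun kv' h' hp' => congrArg Prod.snd (kw_uniq h' hkv hp' hpre)
    rw [loopA_eq_some t kv.2 sectionPairs ⟨kv, hkv, hpre, rfl⟩ huniqA]
    obtain ⟨r, hr⟩ := id hpre
    have hlen := kw_len kv hkv
    have hle : kv.1.toList.length ≤ t.toList.length := by
      rw [← hr]; simp
    have hlen_eq : (PySem.Str.len t : Int) = (t.toList.length : Int) := by
      simp [PySem.Str.len_eq]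
    -- the hit at i = len(keyword)
    have hi0 : hitB t ((kv.1.toList.length : Int)) = some kv.2 := by
      have hs : (PySem.Str.slice t none (some ((kv.1.toList.length : Int)))).toList = kv.1.toList := by
        rw [slice_toList t _ (by positivity), Int.toNat_natCast, ← hr, List.take_left]
      have : PySem.Str.slice t none (some ((kv.1.toList.length : Int))) = kv.1 :=
        String.toList_inj.mp hs
      rw [hitB, this]
      exact kw_lookup kv hkv
    have hmem : ((kv.1.toList.length : Int)) ∈
        PySem.List.pyRange 1 (min ((PySem.Str.len t : Int)) maxKeyLen + 1) 1 := by
      rw [PySem.List.mem_pyRange_one]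
      rw [hlen_eq]
      unfold maxKeyLen
      omega
    refine (loopB_eq_some t kv.2 _ ⟨_, hmem, hi0⟩ ?_).symm
    intro j hj w hw
    have hj1 : (1 : Int) ≤ j := ((PySem.List.mem_pyRange_one).mp hj).1
    have hmem' := hitB_some_mem hw
    have hp' : (PySem.Str.slice t none (some j)).toList <+: t.toList := by
      rw [slice_toList t j (by omega)]
      exact List.take_prefix _ _
    exact congrArg Prod.snd (kw_uniq hmem' hkv hp' hpre)
  · simp only [not_exists, not_and] at hex
    rw [loopA_eq_none t sectionPairs hex]
    refine (loopB_eq_none t _ ?_).symm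
    intro j hj
    cases hh : hitB t j with
    | none => rfl
    | some w =>
      have hj1 : (1 : Int) ≤ j := ((PySem.List.mem_pyRange_one).mp hj).1
      have hmem' := hitB_some_mem hh
      have hp' : (PySem.Str.slice t none (some j)).toList <+: t.toList := by
        rw [slice_toList t j (by omega)]
        exact List.take_prefix _ _
      exact absurd hp' (hex _ hmem')

-- ===== VERDICT (by name: the statement is the Claim_ definition above) =====
theorem get_section_name_py_spec : Claim_equal_get_section_name_py := by
  intro header_text _
  unfold Spec_get_section_name_py get_section_name_py get_section_name_py_alt
  exact loops_agree _
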